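-- pv_equiv track=rewrite | github.com/LXZE/AOC_2020 | 24/24_1.py | splitStep
-- ===== SOURCE A (Python) =====
-- def splitStep(ls):
-- 	res = []; tmp = ''
-- 	for char in ls:
-- 		if char == 'e' or char == 'w':
-- 			res.append(tmp + char)
-- 			tmp = ''
-- 		else:
-- 			tmp += char
-- 	return res
-- ===== SOURCE B (Python) =====
-- import re
--
-- def splitStep(ls):
--     return re.findall(r'[^ew]*[ew]', ls)
-- ===== Notes on version B (the rewrite author's own statement) =====
-- stated objective: idiomatic
-- what changed: Replaced the stateful accumulator loop with a single regex tokenization, re.findall with pattern [^ew]*[ew], which yields each maximal run of non-terminal characters anchored on the next terminal and drops any trailing remainder, exactly as A does.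
import Mathlib
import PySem

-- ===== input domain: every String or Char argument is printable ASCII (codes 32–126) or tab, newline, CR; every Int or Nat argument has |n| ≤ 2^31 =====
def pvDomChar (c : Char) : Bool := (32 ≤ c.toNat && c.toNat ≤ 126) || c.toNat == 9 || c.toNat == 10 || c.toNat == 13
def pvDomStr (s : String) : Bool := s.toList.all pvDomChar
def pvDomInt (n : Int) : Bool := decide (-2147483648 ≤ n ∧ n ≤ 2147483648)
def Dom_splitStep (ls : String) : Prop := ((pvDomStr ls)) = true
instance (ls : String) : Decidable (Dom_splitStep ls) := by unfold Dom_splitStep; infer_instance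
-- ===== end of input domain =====

-- B replaces A's stateful accumulator loop with regex tokenization (re.findall r'[^ew]*[ew]'); same values, idiomatic.

-- ===== PORT A =====
-- A's loop: res/tmp accumulators over the characters (strings kept as List Char internally).
def splitStepGo (res : List (List Char)) (tmp : List Char) : List Char → List (List Char)
  | [] => res
  | c :: cs =>
    if c = 'e' ∨ c = 'w' then splitStepGo (res ++ [tmp ++ [c]]) [] cs
    else splitStepGo res (tmp ++ [c]) cs

def splitStep (ls : String) : List String :=
  (splitStepGo [] [] ls.toList).map String.ofList

-- ===== PORT B =====
-- Hand port of re.findall(r'[^ew]*[ew]', ls): at each step the engine greedily matches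
-- [^ew]* (takeWhile non-terminal), then requires one [ew]; if none remains, matching ends
-- (trailing remainder dropped). Exact for this pattern: no backtracking is ever needed.
def reFindallEW (l : List Char) : List (List Char) :=
  match h : l.dropWhile (fun c => !(c = 'e' || c = 'w')) with
  | [] => []
  | c :: rest =>
    (l.takeWhile (fun c => !(c = 'e' || c = 'w')) ++ [c]) :: reFindallEW rest
termination_by l.length
decreasing_by
  have h1 : (l.dropWhile (fun c => !(c = 'e' || c = 'w'))).length ≤ l.length :=
    List.length_dropWhile_le _ _
  rw [h] at h1
  simpa using Nat.lt_of_lt_of_le (Nat.lt_succ_self _) h1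

def splitStep_alt (ls : String) : List String :=
  (reFindallEW ls.toList).map String.ofList

-- ===== PRECONDITION & SPEC =====
def Spec_splitStep (ls : String) (out : List String) : Prop := out = splitStep_alt ls
instance (ls : String) (out : List String) : Decidable (Spec_splitStep ls out) := by unfold Spec_splitStep; infer_instance

-- ===== CLAIM (what is proved, stated in full; the proofs are below) =====
def Claim_equal_splitStep : Prop := ∀ (ls : String), Dom_splitStep ls → Spec_splitStep ls (splitStep ls)

-- ===== LEMMAS AND PROOFS =====

-- prepend tmp to the first token, if any
def consFirst (tmp : List Char) : List (List Char) → List (List Char)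
  | [] => []
  | t :: ts => (tmp ++ t) :: ts

theorem consFirst_nil (ts : List (List Char)) : consFirst [] ts = ts := by
  cases ts <;> simp [consFirst]

theorem reFindallEW_of_nil (l : List Char)
    (h : l.dropWhile (fun c => !(c = 'e' || c = 'w')) = []) : reFindallEW l = [] := by
  rw [reFindallEW]
  split
  · rfl
  · rename_i c rest h'; rw [h] at h'; cases h'

theorem reFindallEW_of_cons (l : List Char) (c : Char) (rest : List Char)
    (h : l.dropWhile (fun c => !(c = 'e' || c = 'w')) = c :: rest) :
    reFindallEW l = (l.takeWhile (fun c => !(c = 'e' || c = 'w')) ++ [c]) :: reFindallEW rest := by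
  rw [reFindallEW]
  split
  · rename_i h'; rw [h] at h'; cases h'
  · rename_i c' rest' h'
    rw [h] at h'
    injection h' with h1 h2
    subst h1; subst h2; rfl

theorem splitStepGo_eq (l : List Char) :
    ∀ (res : List (List Char)) (tmp : List Char),
      splitStepGo res tmp l = res ++ consFirst tmp (reFindallEW l) := by
  induction l with
  | nil =>
    intro res tmp
    rw [reFindallEW_of_nil [] (by simp)]
    simp [splitStepGo, consFirst]
  | cons c cs ih =>
    intro res tmp
    by_cases hc : c = 'e' ∨ c = 'w'
    · have hb : (!(c = 'e' || c = 'w')) = false := by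
        simp only [Bool.not_eq_false', Bool.or_eq_true, decide_eq_true_eq]; exact hc
      have hd : (c :: cs).dropWhile (fun c => !(c = 'e' || c = 'w')) = c :: cs := by
        rw [List.dropWhile_cons, hb]; simp
      have ht : (c :: cs).takeWhile (fun c => !(c = 'e' || c = 'w')) = [] := by
        rw [List.takeWhile_cons, hb]; simp
      rw [reFindallEW_of_cons (c :: cs) c cs hd, ht]
      simp only [splitStepGo, if_pos hc, ih, consFirst_nil, consFirst]
      simp only [List.append_assoc, List.cons_append, List.nil_append]
      cases reFindallEW cs <;> rfl
    · have hb : (!(c = 'e' || c = 'w')) = true := by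
        simp only [Bool.not_eq_true', Bool.or_eq_false_iff, decide_eq_false_iff_not]
        exact ⟨fun h => hc (Or.inl h), fun h => hc (Or.inr h)⟩
      have hd : (c :: cs).dropWhile (fun c => !(c = 'e' || c = 'w'))
          = cs.dropWhile (fun c => !(c = 'e' || c = 'w')) := by
        rw [List.dropWhile_cons, hb]; simp
      have ht : (c :: cs).takeWhile (fun c => !(c = 'e' || c = 'w'))
          = c :: cs.takeWhile (fun c => !(c = 'e' || c = 'w')) := by
        rw [List.takeWhile_cons, hb]; simp
      simp only [splitStepGo, if_neg hc, ih]
      cases hrest : cs.dropWhile (fun c => !(c = 'e' || c = 'w')) with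
      | nil =>
        rw [reFindallEW_of_nil cs hrest,
            reFindallEW_of_nil (c :: cs) (hd.trans hrest)]
        simp [consFirst]
      | cons d rest =>
        rw [reFindallEW_of_cons cs d rest hrest,
            reFindallEW_of_cons (c :: cs) d rest (hd.trans hrest), ht]
        simp [consFirst]

-- ===== VERDICT (by name: the statement is the Claim_ definition above) =====
theorem splitStep_spec : Claim_equal_splitStep := by
  intro ls _
  unfold Spec_splitStep splitStep splitStep_alt
  rw [splitStepGo_eq, consFirst_nil]
  simp
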